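-- pv_equiv track=rewrite | github.com/Alexandre-Blain/JPEG-Compression-app | presentation-background_code/haufman_code.py | zigzag_decode
-- ===== SOURCE A (Python) =====
-- def zigzag_decode(zigzag_data, rows, cols):
--     matrix = [[0] * cols for _ in range(rows)]
--     index = 0
--     for i in range(rows + cols - 1):
--         if i % 2 == 0:
--             for j in range(max(0, i - cols + 1), min(rows, i + 1)):
--                 matrix[j][i - j] = zigzag_data[index]
--                 index += 1
--         else:
--             for j in range(min(i, rows - 1), max(0, i - cols + 1) - 1, -1):
--                 matrix[j][i - j] = zigzag_data[index]
--                 index += 1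
--     return matrix
-- ===== SOURCE B (Python) =====
-- def zigzag_decode(zigzag_data, rows, cols):
--     # one flat pass over the coordinates sorted into zigzag order by an integer key
--     m = 2 * (rows + cols)
--     def key(rc):
--         r, c = rc
--         d = r + c
--         return d * m + (r if d % 2 == 0 else -r)
--     coords = sorted(((r, c) for r in range(rows) for c in range(cols)), key=key)
--     matrix = [[0] * cols for _ in range(rows)]
--     for k, (r, c) in enumerate(coords):
--         matrix[r][c] = zigzag_data[k]
--     return matrix
-- ===== Notes on version B (the rewrite author's own statement) =====
-- stated objective: alternative
-- what changed: Replaces A's direction-alternating diagonal walk (nested loops with a running data index) by enumerating all (r,c) cells, sorting them into zigzag order with a single integer key, and one flat enumerated assignment pass.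
import Mathlib
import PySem

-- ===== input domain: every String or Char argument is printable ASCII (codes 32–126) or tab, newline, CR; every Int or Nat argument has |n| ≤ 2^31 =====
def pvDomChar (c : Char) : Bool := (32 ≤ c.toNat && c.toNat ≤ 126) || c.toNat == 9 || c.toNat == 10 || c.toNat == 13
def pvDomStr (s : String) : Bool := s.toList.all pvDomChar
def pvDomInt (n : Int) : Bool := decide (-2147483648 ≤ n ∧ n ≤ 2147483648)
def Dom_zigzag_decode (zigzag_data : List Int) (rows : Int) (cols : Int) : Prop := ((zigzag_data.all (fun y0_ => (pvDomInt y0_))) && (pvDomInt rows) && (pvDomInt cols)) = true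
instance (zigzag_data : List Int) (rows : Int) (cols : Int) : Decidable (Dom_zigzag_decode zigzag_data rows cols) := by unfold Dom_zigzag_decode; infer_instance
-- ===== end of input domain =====

-- B replaces A's direction-alternating diagonal walk by sorting all (r,c) cells with an
-- integer zigzag key and one flat enumerated assignment pass (alternative algorithm, not faster).


-- ===== PORT A =====
-- literal port of A's diagonal walk; 'zigzag_data[index]' is pyGetD (the default 0 is only
-- reachable where Python raises IndexError, excluded by Pre_).
def zigzag_decode (zigzag_data : List Int) (rows : Int) (cols : Int) : List (List Int) :=
  -- matrix = [[0] * cols for _ in range(rows)]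
  let matrix : List (List Int) :=
    (PySem.List.pyRange 0 rows 1).map (fun _ => PySem.List.pyRepeat [(0 : Int)] cols)
  -- index = 0; for i in range(rows + cols - 1): …
  let res := (PySem.List.pyRange 0 (rows + cols - 1) 1).foldl (fun st i =>
    if PySem.Int.mod i 2 == 0 then
      (PySem.List.pyRange (max 0 (i - cols + 1)) (min rows (i + 1)) 1).foldl (fun st j =>
        (PySem.List.pySetD st.1 j
            (PySem.List.pySetD (PySem.List.pyGetD st.1 j []) (i - j)
              (PySem.List.pyGetD zigzag_data st.2 0)),
         st.2 + 1)) st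
    else
      (PySem.List.pyRange (min i (rows - 1)) (max 0 (i - cols + 1) - 1) (-1)).foldl (fun st j =>
        (PySem.List.pySetD st.1 j
            (PySem.List.pySetD (PySem.List.pyGetD st.1 j []) (i - j)
              (PySem.List.pyGetD zigzag_data st.2 0)),
         st.2 + 1)) st) (matrix, (0 : Int))
  res.1

-- ===== PORT B =====
-- literal port of Source B: sort the cell coordinates by the integer zigzag key, then one flat pass.
def zigzag_decode_alt (zigzag_data : List Int) (rows : Int) (cols : Int) : List (List Int) :=
  let m := 2 * (rows + cols)
  let key : Int × Int → Int := fun rc =>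
    (rc.1 + rc.2) * m + (if PySem.Int.mod (rc.1 + rc.2) 2 == 0 then rc.1 else -rc.1)
  let coords := PySem.List.sorted
    ((PySem.List.pyRange 0 rows 1).flatMap
      (fun r => (PySem.List.pyRange 0 cols 1).map (fun c => (r, c)))) key
  let matrix : List (List Int) :=
    (PySem.List.pyRange 0 rows 1).map (fun _ => PySem.List.pyRepeat [(0 : Int)] cols)
  (PySem.List.enumerate coords 0).foldl (fun mat kv =>
    PySem.List.pySetD mat kv.2.1
      (PySem.List.pySetD (PySem.List.pyGetD mat kv.2.1 []) kv.2.2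
        (PySem.List.pyGetD zigzag_data kv.1 0))) matrix

-- ===== PRECONDITION & SPEC =====
-- A raises IndexError iff the matrix has cells beyond the data (rows, cols > 0 and
-- rows*cols > len(zigzag_data)); Pre_ excludes exactly those inputs.
def Pre_zigzag_decode (zigzag_data : List Int) (rows : Int) (cols : Int) : Prop :=
  0 < rows → 0 < cols → rows * cols ≤ (zigzag_data.length : Int)
instance (zigzag_data : List Int) (rows : Int) (cols : Int) : Decidable (Pre_zigzag_decode zigzag_data rows cols) := by unfold Pre_zigzag_decode; infer_instance
def pvWitness_zigzag_decode : List Int × Int × Int := ([1, 2, 3, 4, 5, 6], 2, 3)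

def Spec_zigzag_decode (zigzag_data : List Int) (rows : Int) (cols : Int) (out : List (List Int)) : Prop := out = zigzag_decode_alt zigzag_data rows cols
instance (zigzag_data : List Int) (rows : Int) (cols : Int) (out : List (List Int)) : Decidable (Spec_zigzag_decode zigzag_data rows cols out) := by unfold Spec_zigzag_decode; infer_instance

-- ===== CLAIM (what is proved, stated in full; the proofs are below) =====
def Claim_equal_zigzag_decode : Prop := ∀ (zigzag_data : List Int) (rows : Int) (cols : Int), Dom_zigzag_decode zigzag_data rows cols → Pre_zigzag_decode zigzag_data rows cols → Spec_zigzag_decode zigzag_data rows cols (zigzag_decode zigzag_data rows cols)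

-- ===== LEMMAS AND PROOFS =====

-- A's per-cell state update: assign data[index] at (r, c), bump index.
def zzStep (data : List Int) (st : List (List Int) × Int) (p : Int × Int) : List (List Int) × Int :=
  (PySem.List.pySetD st.1 p.1
      (PySem.List.pySetD (PySem.List.pyGetD st.1 p.1 []) p.2 (PySem.List.pyGetD data st.2 0)),
   st.2 + 1)

-- B's per-cell update, driven by enumerate.
def zzStepE (data : List Int) (mat : List (List Int)) (kv : Int × (Int × Int)) : List (List Int) :=
  PySem.List.pySetD mat kv.2.1
    (PySem.List.pySetD (PySem.List.pyGetD mat kv.2.1 []) kv.2.2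
      (PySem.List.pyGetD data kv.1 0))

-- the coordinates A's diagonal i visits, in A's order
def zzDiag (rows cols i : Int) : List (Int × Int) :=
  if PySem.Int.mod i 2 == 0 then
    (PySem.List.pyRange (max 0 (i - cols + 1)) (min rows (i + 1)) 1).map (fun j => (j, i - j))
  else
    (PySem.List.pyRange (min i (rows - 1)) (max 0 (i - cols + 1) - 1) (-1)).map (fun j => (j, i - j))

def zzOrder (rows cols : Int) : List (Int × Int) :=
  (PySem.List.pyRange 0 (rows + cols - 1) 1).flatMap (zzDiag rows cols)

def zzKey (m : Int) (rc : Int × Int) : Int :=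
  (rc.1 + rc.2) * m + (if PySem.Int.mod (rc.1 + rc.2) 2 == 0 then rc.1 else -rc.1)

def zzProd (rows cols : Int) : List (Int × Int) :=
  (PySem.List.pyRange 0 rows 1).flatMap
    (fun r => (PySem.List.pyRange 0 cols 1).map (fun c => (r, c)))

lemma mem_zzDiag (rows cols i : Int) (p : Int × Int) :
    p ∈ zzDiag rows cols i ↔
      0 ≤ p.1 ∧ p.1 < rows ∧ 0 ≤ p.2 ∧ p.2 < cols ∧ p.1 + p.2 = i := by
  obtain ⟨r, c⟩ := p
  unfold zzDiag
  split <;>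
  · simp only [List.mem_map, PySem.List.mem_pyRange_one, PySem.List.mem_pyRange_neg_one,
      Prod.mk.injEq]
    constructor
    · rintro ⟨j, hj, rfl, rfl⟩; omega
    · rintro ⟨h1, h2, h3, h4, h5⟩; exact ⟨r, by omega, rfl, by omega⟩

lemma mem_zzOrder (rows cols : Int) (p : Int × Int) :
    p ∈ zzOrder rows cols ↔ 0 ≤ p.1 ∧ p.1 < rows ∧ 0 ≤ p.2 ∧ p.2 < cols := by
  unfold zzOrder
  simp only [List.mem_flatMap, PySem.List.mem_pyRange_one, mem_zzDiag]
  constructor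
  · rintro ⟨i, _, h⟩; exact ⟨h.1, h.2.1, h.2.2.1, h.2.2.2.1⟩
  · rintro ⟨h1, h2, h3, h4⟩; exact ⟨p.1 + p.2, ⟨by omega, by omega⟩, h1, h2, h3, h4, rfl⟩

lemma mem_zzProd (rows cols : Int) (p : Int × Int) :
    p ∈ zzProd rows cols ↔ 0 ≤ p.1 ∧ p.1 < rows ∧ 0 ≤ p.2 ∧ p.2 < cols := by
  obtain ⟨r, c⟩ := p
  unfold zzProd
  simp only [List.mem_flatMap, List.mem_map, PySem.List.mem_pyRange_one, Prod.mk.injEq]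
  constructor
  · rintro ⟨a, ha, b, hb, rfl, rfl⟩; omega
  · rintro ⟨h1, h2, h3, h4⟩; exact ⟨r, ⟨h1, h2⟩, c, ⟨h3, h4⟩, rfl, rfl⟩

-- the zigzag key is strictly increasing along A's visiting order
lemma zzOrder_pairwise (rows cols : Int) :
    (zzOrder rows cols).Pairwise
      (fun a b => zzKey (2 * (rows + cols)) a < zzKey (2 * (rows + cols)) b) := by
  unfold zzOrder
  rw [List.flatMap_def, List.pairwise_flatten]
  constructor
  · intro l hl
    simp only [List.mem_map] at hl
    obtain ⟨i, hi, rfl⟩ := hl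
    unfold zzDiag
    have h2 : PySem.Int.mod i 2 = 0 ∨ PySem.Int.mod i 2 = 1 := PySem.Int.mod_two_eq i
    split
    next h =>
      rw [List.pairwise_map]
      refine (PySem.List.pairwise_lt_pyRange_one _ _).imp ?_
      intro a b hab
      simp only [zzKey]
      have e1 : a + (i - a) = i := by ring
      have e2 : b + (i - b) = i := by ring
      rw [e1, e2]
      split_ifs
      omega
    next h =>
      rw [PySem.List.pyRange_neg_one_eq_reverse, List.map_reverse, List.pairwise_reverse,
        List.pairwise_map]
      refine (PySem.List.pairwise_lt_pyRange_one _ _).imp ?_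
      intro a b hab
      simp only [zzKey]
      have e1 : a + (i - a) = i := by ring
      have e2 : b + (i - b) = i := by ring
      rw [e1, e2]
      split_ifs
      omega
  · rw [List.pairwise_map]
    refine (PySem.List.pairwise_lt_pyRange_one _ _).imp ?_
    intro i i' hii' a ha b hb
    rw [mem_zzDiag] at ha hb
    obtain ⟨ha1, ha2, ha3, ha4, ha5⟩ := ha
    obtain ⟨hb1, hb2, hb3, hb4, hb5⟩ := hb
    simp only [zzKey, ha5, hb5]
    have hm : (0 : Int) ≤ 2 * (rows + cols) := by omega
    have hk : (1 : Int) ≤ i' - i := by omega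
    have hmul : 1 * (2 * (rows + cols)) ≤ (i' - i) * (2 * (rows + cols)) :=
      mul_le_mul_of_nonneg_right hk hm
    rw [sub_mul] at hmul
    split_ifs <;> omega

lemma zzProd_pairwise (rows cols : Int) :
    (zzProd rows cols).Pairwise (fun a b : Int × Int => a.1 * cols + a.2 < b.1 * cols + b.2) := by
  unfold zzProd
  rw [List.flatMap_def, List.pairwise_flatten]
  constructor
  · intro l hl
    simp only [List.mem_map] at hl
    obtain ⟨r, hr, rfl⟩ := hl
    rw [List.pairwise_map]
    exact (PySem.List.pairwise_lt_pyRange_one _ _).imp (fun hab => by simpa using hab)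
  · rw [List.pairwise_map]
    refine (PySem.List.pairwise_lt_pyRange_one _ _).imp ?_
    intro r r' hrr' a ha b hb
    simp only [List.mem_map, PySem.List.mem_pyRange_one] at ha hb
    obtain ⟨c, hc, rfl, rfl⟩ := ha
    obtain ⟨c', hc', rfl, rfl⟩ := hb
    have hk : (1 : Int) ≤ r' - r := by omega
    have hmul : 1 * cols ≤ (r' - r) * cols := mul_le_mul_of_nonneg_right hk (by omega)
    rw [sub_mul, one_mul] at hmul
    dsimp only
    omega

lemma strict_key_nodup {α : Type} {K : α → Int} {l : List α}
    (h : l.Pairwise (fun a b => K a < K b)) : l.Nodup :=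
  h.imp (fun hab => by rintro rfl; exact absurd hab (lt_irrefl _))

-- the sort in B reproduces exactly A's visiting order
lemma sorted_eq_zzOrder (rows cols : Int) :
    PySem.List.sorted (zzProd rows cols) (zzKey (2 * (rows + cols))) = zzOrder rows cols := by
  apply PySem.List.sorted_eq_of_perm_of_pairwise_lt
  · rw [List.perm_ext_iff_of_nodup (strict_key_nodup (zzOrder_pairwise rows cols))
      (strict_key_nodup (zzProd_pairwise rows cols))]
    intro p
    rw [mem_zzOrder, mem_zzProd]
  · exact zzOrder_pairwise rows cols

-- a fold threading (matrix, index) is the enumerated fold on the matrix alone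
lemma foldl_zzStep_enumerate (data : List Int) (L : List (Int × Int)) :
    ∀ (m0 : List (List Int)) (n : Int),
      (L.foldl (zzStep data) (m0, n)).1 =
        (PySem.List.enumerate L n).foldl (zzStepE data) m0 := by
  induction L with
  | nil => intro m0 n; simp [PySem.List.enumerate_nil]
  | cons p t ih =>
      intro m0 n
      rw [PySem.List.enumerate_cons]
      simp only [List.foldl_cons]
      exact ih _ _

-- A's nested loops are the flat fold of zzStep over zzOrder
lemma zigzag_decode_eq_flat (data : List Int) (rows cols : Int) :
    zigzag_decode data rows cols =
      ((zzOrder rows cols).foldl (zzStep data)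
        ((PySem.List.pyRange 0 rows 1).map (fun _ => PySem.List.pyRepeat [(0 : Int)] cols),
         (0 : Int))).1 := by
  unfold zigzag_decode zzOrder
  dsimp only
  rw [List.flatMap_def, List.foldl_flatten, List.foldl_map]
  congr 1
  refine PySem.List.foldl_congr_mem _ _ _ _ ?_
  intro st i _
  unfold zzDiag
  by_cases hc : PySem.Int.mod i 2 == 0
  · simp only [if_pos hc, List.foldl_map]
    rfl
  · simp only [if_neg hc, List.foldl_map]
    rfl

theorem zigzag_decode_spec : Claim_equal_zigzag_decode := by
  intro data rows cols _hdom _hpre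
  unfold Spec_zigzag_decode zigzag_decode_alt
  rw [zigzag_decode_eq_flat, foldl_zzStep_enumerate]
  show _ = (PySem.List.enumerate
      (PySem.List.sorted (zzProd rows cols) (zzKey (2 * (rows + cols)))) 0).foldl _ _
  rw [sorted_eq_zzOrder]
  rfl
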